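-- pv_equiv track=rewrite | github.com/sntrblck-sudo/Nova | skills/advanced_memory/loop_detector.py | suggest_pivot
-- ===== SOURCE A (Python) =====
-- def suggest_pivot(loops):
--     """Suggest a pivot strategy when loops are detected."""
--     if not loops:
--         return None
--
--     suggestions = []
--     for loop in loops:
--         sig = loop.get("signature", "")
--         count = loop.get("count", 0)
--
--         # Generic suggestions based on pattern
--         if "web_fetch" in sig or "search" in sig:
--             suggestions.append("Consider changing search terms or trying a different source")
--         elif "exec" in sig or "python" in sig:
--             suggestions.append("Command may be failing silently — check for errors")
--         elif "read" in sig: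
--             suggestions.append("File access issue — verify path exists or try alternative")
--         elif "edit" in sig or "write" in sig:
--             suggestions.append("File operation repeating — check permissions or content")
--         else:
--             suggestions.append("Action repeating — try a different approach")
--
--     return suggestions
-- ===== SOURCE B (Python) =====
-- # Staged-pass reimplementation: a flat keyword -> rule-index map; the message is
-- # picked by the MINIMUM matched rule index (priority = numeric order), then a
-- # table lookup — instead of a per-item first-match if/elif chain.
-- _KEYWORD_RULE = {
--     "web_fetch": 0, "search": 0,
--     "exec": 1, "python": 1,
--     "read": 2,
--     "edit": 3, "write": 3,
-- }
-- _MESSAGES = [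
--     "Consider changing search terms or trying a different source",
--     "Command may be failing silently — check for errors",
--     "File access issue — verify path exists or try alternative",
--     "File operation repeating — check permissions or content",
--     "Action repeating — try a different approach",
-- ]
--
--
-- def suggest_pivot(loops):
--     """Suggest a pivot strategy when loops are detected."""
--     if not loops:
--         return None
--     sigs = [loop.get("signature", "") for loop in loops]
--     idxs = [min((i for k, i in _KEYWORD_RULE.items() if k in s), default=4)
--             for s in sigs]
--     return [_MESSAGES[i] for i in idxs]
-- ===== Notes on version B (the rewrite author's own statement) =====
-- stated objective: alternative
-- what changed: Replaced the per-loop first-match if/elif chain by three staged passes: extract signatures, classify each by taking the MINIMUM rule index over a flat keyword-to-index map (priority becomes numeric order, not branch order), then look the message up in a table.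
import Mathlib
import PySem

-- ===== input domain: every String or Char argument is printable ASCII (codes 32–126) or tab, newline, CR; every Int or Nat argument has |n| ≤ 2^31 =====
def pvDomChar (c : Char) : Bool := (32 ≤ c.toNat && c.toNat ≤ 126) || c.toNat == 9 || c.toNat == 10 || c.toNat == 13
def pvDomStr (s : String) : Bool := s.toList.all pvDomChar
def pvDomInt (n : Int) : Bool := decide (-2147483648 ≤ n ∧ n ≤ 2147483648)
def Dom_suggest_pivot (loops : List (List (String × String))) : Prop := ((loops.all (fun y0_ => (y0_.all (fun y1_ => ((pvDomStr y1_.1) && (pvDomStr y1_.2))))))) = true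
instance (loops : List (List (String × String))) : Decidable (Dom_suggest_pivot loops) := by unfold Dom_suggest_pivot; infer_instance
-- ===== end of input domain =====

-- B replaces A's per-loop first-match if/elif chain by three staged passes with a
-- minimum-matched-rule-index classification over a flat keyword map (objective: alternative).

-- shared convention: dict.get(k, default) on the association list (first match)
def pvDictGetD (loop : List (String × String)) (k v : String) : String :=
  match loop.find? (fun p => p.1 == k) with
  | some p => p.2
  | none => v

-- ===== PORT A =====
-- Note: A also reads loop.get("count", 0) into an unused local; it is dropped here
-- (its int default is not a value of the string-valued dict and it never affects the result).
def suggest_pivot (loops : List (List (String × String))) : Option (List String) :=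
  if loops.isEmpty then none
  else some (loops.foldl (fun suggestions loop =>
    let sig := pvDictGetD loop "signature" ""
    suggestions ++
      [if PySem.Str.isIn "web_fetch" sig || PySem.Str.isIn "search" sig then
        "Consider changing search terms or trying a different source"
      else if PySem.Str.isIn "exec" sig || PySem.Str.isIn "python" sig then
        "Command may be failing silently — check for errors"
      else if PySem.Str.isIn "read" sig then
        "File access issue — verify path exists or try alternative"
      else if PySem.Str.isIn "edit" sig || PySem.Str.isIn "write" sig then
        "File operation repeating — check permissions or content"
      else
        "Action repeating — try a different approach"]) [])

-- ===== PORT B =====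
def pvKeywordRule : List (String × Nat) :=
  [("web_fetch", 0), ("search", 0),
   ("exec", 1), ("python", 1),
   ("read", 2),
   ("edit", 3), ("write", 3)]

def pvMessages : List String :=
  ["Consider changing search terms or trying a different source",
   "Command may be failing silently — check for errors",
   "File access issue — verify path exists or try alternative",
   "File operation repeating — check permissions or content",
   "Action repeating — try a different approach"]

-- min(..., default=4) over the matched rule indices
def pvRuleIdx (s : String) : Nat :=
  ((PySem.List.min?
      (pvKeywordRule.filterMap (fun p => if PySem.Str.isIn p.1 s then some p.2 else none))
      (fun i => i))).getD 4

def suggest_pivot_alt (loops : List (List (String × String))) : Option (List String) :=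
  if loops.isEmpty then none
  else
    let sigs := loops.map (fun loop => pvDictGetD loop "signature" "")
    let idxs := sigs.map pvRuleIdx
    some (idxs.map (fun i => pvMessages.getD i ""))  -- i ≤ 4 always, so getD never falls back

-- ===== PRECONDITION & SPEC =====
def Spec_suggest_pivot (loops : List (List (String × String))) (out : Option (List String)) : Prop := out = suggest_pivot_alt loops
instance (loops : List (List (String × String))) (out : Option (List String)) : Decidable (Spec_suggest_pivot loops out) := by unfold Spec_suggest_pivot; infer_instance

-- ===== CLAIM =====
def Claim_equal_suggest_pivot : Prop := ∀ (loops : List (List (String × String))), Dom_suggest_pivot loops → Spec_suggest_pivot loops (suggest_pivot loops)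

-- ===== LEMMAS AND PROOFS =====

theorem pvClassify_eq (sig : String) :
    pvMessages.getD (pvRuleIdx sig) "" =
      (if PySem.Str.isIn "web_fetch" sig || PySem.Str.isIn "search" sig then
        "Consider changing search terms or trying a different source"
      else if PySem.Str.isIn "exec" sig || PySem.Str.isIn "python" sig then
        "Command may be failing silently — check for errors"
      else if PySem.Str.isIn "read" sig then
        "File access issue — verify path exists or try alternative"
      else if PySem.Str.isIn "edit" sig || PySem.Str.isIn "write" sig then
        "File operation repeating — check permissions or content"
      else
        "Action repeating — try a different approach") := by
  by_cases h1 : PySem.Str.isIn "web_fetch" sig = true <;>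
    by_cases h2 : PySem.Str.isIn "search" sig = true <;>
      by_cases h3 : PySem.Str.isIn "exec" sig = true <;>
        by_cases h4 : PySem.Str.isIn "python" sig = true <;>
          by_cases h5 : PySem.Str.isIn "read" sig = true <;>
            by_cases h6 : PySem.Str.isIn "edit" sig = true <;>
              by_cases h7 : PySem.Str.isIn "write" sig = true <;>
                simp_all [pvRuleIdx, pvKeywordRule, pvMessages, List.filterMap,
                          PySem.List.min?]

theorem pv_foldl_map (loops : List (List (String × String))) (acc : List String) :
    loops.foldl (fun suggestions loop =>
        suggestions ++ [pvMessages.getD (pvRuleIdx (pvDictGetD loop "signature" "")) ""]) acc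
      = acc ++ loops.map (fun loop =>
          pvMessages.getD (pvRuleIdx (pvDictGetD loop "signature" "")) "") := by
  induction loops generalizing acc with
  | nil => simp
  | cons h t ih => simp only [List.foldl, ih, List.map_cons, List.append_assoc, List.cons_append, List.nil_append]

-- ===== VERDICT =====
theorem suggest_pivot_spec : Claim_equal_suggest_pivot := by
  intro loops _
  unfold Spec_suggest_pivot suggest_pivot suggest_pivot_alt
  split
  · rfl
  · simp only [← pvClassify_eq, pv_foldl_map, List.nil_append, List.map_map]
    rfl
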